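-- pv_equiv track=rewrite | github.com/Jiayii03/MLS-category-prediction-task | util/text_cleaning.py | is_interleaved_alphanumeric
-- ===== SOURCE A (Python) =====
-- def is_interleaved_alphanumeric(text):
--     """Check if text has interleaved letters and numbers"""
--     is_digit_prev = text[0].isdigit()
--     transitions = 0
--     for char in text[1:]:
--         is_digit_curr = char.isdigit()
--         if is_digit_curr != is_digit_prev:
--             transitions += 1
--         is_digit_prev = is_digit_curr
--     return transitions > 2
-- ===== SOURCE B (Python) =====
-- def is_interleaved_alphanumeric(text):
--     """Check if text has interleaved letters and numbers"""
--     runs = 0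
--     i = 0
--     n = len(text)
--     while i < n:
--         k = text[i].isdigit()
--         while i < n and text[i].isdigit() == k:
--             i += 1
--         runs += 1
--     return runs > 3
-- ===== Notes on version B (the rewrite author's own statement) =====
-- stated objective: alternative
-- what changed: B counts maximal digit/non-digit runs by an outer loop that strips one whole run per iteration with an inner index scan, and tests runs > 3, instead of A's single pass with a previous-class accumulator counting transitions against 2.
-- outside the precondition, e.g. on is_interleaved_alphanumeric(''): A raises IndexError, B returns False
-- crash fix: On the empty string A raises IndexError (it indexes text[0]); B returns False (zero runs). — e.g. on is_interleaved_alphanumeric(""): A raises IndexError, B returns false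
import Mathlib
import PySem

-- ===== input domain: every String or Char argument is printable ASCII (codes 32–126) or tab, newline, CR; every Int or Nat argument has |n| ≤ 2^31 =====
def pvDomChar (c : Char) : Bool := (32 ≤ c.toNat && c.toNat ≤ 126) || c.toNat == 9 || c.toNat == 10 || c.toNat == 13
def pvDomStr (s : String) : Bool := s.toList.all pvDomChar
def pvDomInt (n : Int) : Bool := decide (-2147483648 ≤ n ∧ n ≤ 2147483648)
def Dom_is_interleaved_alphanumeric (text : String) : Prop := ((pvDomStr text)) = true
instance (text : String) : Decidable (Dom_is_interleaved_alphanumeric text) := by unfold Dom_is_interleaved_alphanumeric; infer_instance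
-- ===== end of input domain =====

-- B counts maximal digit/non-digit runs (strip one run per outer step) instead of A's
-- transition counter with a previous-class accumulator (objective: alternative).
-- ===== PORT A =====
-- A: seed prev with text[0].isdigit() (IndexError on "", excluded by Pre_), then one pass
-- over text[1:] counting class transitions.
def is_interleaved_alphanumeric (text : String) : Bool :=
  match text.toList with
  | [] => false  -- Python raises IndexError here; excluded by Pre_
  | c0 :: rest =>
    let st := rest.foldl
      (fun (st : Bool × Int) char =>
        let is_digit_curr := PySem.Chars.isdigit char
        let transitions := if is_digit_curr != st.1 then st.2 + 1 else st.2
        (is_digit_curr, transitions))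
      (PySem.Chars.isdigit c0, 0)
    st.2 > 2

-- ===== PORT B =====
-- B's outer while loop = recursion on the remaining suffix; its inner index-advancing
-- while loop = dropWhile of the current class; runs is incremented once per outer step.
def pvRunCount : List Char → Nat
  | [] => 0
  | c :: cs =>
    let k := PySem.Chars.isdigit c
    1 + pvRunCount (cs.dropWhile (fun d => PySem.Chars.isdigit d == k))
termination_by l => l.length
decreasing_by
  simp only [List.length_cons]
  exact Nat.lt_succ_of_le (List.length_dropWhile_le _ _)

def is_interleaved_alphanumeric_alt (text : String) : Bool :=
  pvRunCount text.toList > 3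

-- ===== PRECONDITION & SPEC =====
-- Pre_ excludes only the empty string, on which A raises IndexError at text[0].
def Pre_is_interleaved_alphanumeric (text : String) : Prop := text ≠ ""
instance (text : String) : Decidable (Pre_is_interleaved_alphanumeric text) := by
  unfold Pre_is_interleaved_alphanumeric; infer_instance
def pvWitness_is_interleaved_alphanumeric : String := "ab12c3"

-- On the empty string A raises IndexError (it indexes text[0]); B returns False (zero runs).
def Raises_is_interleaved_alphanumeric (text : String) : Prop := text = ""
instance (text : String) : Decidable (Raises_is_interleaved_alphanumeric text) := by
  unfold Raises_is_interleaved_alphanumeric; infer_instance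
def pvRaiseWitness_is_interleaved_alphanumeric : String := ""
def pvRaiseWitnessOut_is_interleaved_alphanumeric : Bool := false

def Spec_is_interleaved_alphanumeric (text : String) (out : Bool) : Prop := out = is_interleaved_alphanumeric_alt text
instance (text : String) (out : Bool) : Decidable (Spec_is_interleaved_alphanumeric text out) := by unfold Spec_is_interleaved_alphanumeric; infer_instance

-- ===== CLAIM (what is proved, stated in full; the proofs are below) =====
def Claim_equal_is_interleaved_alphanumeric : Prop := ∀ (text : String), Dom_is_interleaved_alphanumeric text → Pre_is_interleaved_alphanumeric text → Spec_is_interleaved_alphanumeric text (is_interleaved_alphanumeric text)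
def Claim_raises_is_interleaved_alphanumeric : Prop := (∀ (text : String), Dom_is_interleaved_alphanumeric text → Raises_is_interleaved_alphanumeric text → ¬ Pre_is_interleaved_alphanumeric text) ∧ (Dom_is_interleaved_alphanumeric (pvRaiseWitness_is_interleaved_alphanumeric) ∧ Raises_is_interleaved_alphanumeric (pvRaiseWitness_is_interleaved_alphanumeric) ∧ is_interleaved_alphanumeric_alt (pvRaiseWitness_is_interleaved_alphanumeric) = pvRaiseWitnessOut_is_interleaved_alphanumeric)

-- ===== LEMMAS AND PROOFS =====

-- unfold equations for the well-founded pvRunCount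
theorem pvRunCount_nil : pvRunCount [] = 0 := by rw [pvRunCount.eq_def]
theorem pvRunCount_cons (c : Char) (cs : List Char) :
    pvRunCount (c :: cs)
      = 1 + pvRunCount (cs.dropWhile (fun d => PySem.Chars.isdigit d == PySem.Chars.isdigit c)) := by
  rw [pvRunCount.eq_def]

-- number of adjacent class changes in ds, given previous class p
def pvTrans (p : Bool) : List Bool → Nat
  | [] => 0
  | d :: ds => (if d ≠ p then 1 else 0) + pvTrans d ds

theorem pvFoldA (rest : List Char) : ∀ (p : Bool) (t : Int),
    (rest.foldl
      (fun (st : Bool × Int) char =>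
        let is_digit_curr := PySem.Chars.isdigit char
        let transitions := if is_digit_curr != st.1 then st.2 + 1 else st.2
        (is_digit_curr, transitions))
      (p, t)).2 = t + (pvTrans p (rest.map (fun c => PySem.Chars.isdigit c)) : Int) := by
  induction rest with
  | nil => simp [pvTrans]
  | cons c cs ih =>
    intro p t
    simp only [List.foldl_cons, List.map_cons, pvTrans]
    rw [ih]
    by_cases h : PySem.Chars.isdigit c = p <;> simp [h] <;> ring

-- stripping the current run and counting the remaining runs = counting transitions
theorem pvRunsDrop (cs : List Char) : ∀ (k : Bool),
    pvRunCount (cs.dropWhile (fun d => PySem.Chars.isdigit d == k))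
      = pvTrans k (cs.map (fun c => PySem.Chars.isdigit c)) := by
  induction cs with
  | nil => intro k; simp [pvRunCount_nil, pvTrans]
  | cons d ds ih =>
    intro k
    by_cases h : PySem.Chars.isdigit d = k
    · rw [List.dropWhile_cons_of_pos (by simp [h])]
      simp [pvTrans, h, ih k]
    · rw [List.dropWhile_cons_of_neg (by simp [h])]
      rw [pvRunCount_cons]
      simp [pvTrans, h, ih (PySem.Chars.isdigit d)]

-- ===== VERDICT (by name: the statement is the Claim_ definition above) =====
theorem is_interleaved_alphanumeric_spec : Claim_equal_is_interleaved_alphanumeric := by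
  intro text _ hpre
  unfold Spec_is_interleaved_alphanumeric is_interleaved_alphanumeric is_interleaved_alphanumeric_alt
  cases htl : text.toList with
  | nil =>
    have : text = "" := by
      have h := congrArg String.ofList htl
      simpa using h
    exact absurd this hpre
  | cons c0 rest =>
    simp only []
    rw [pvFoldA, pvRunCount_cons, pvRunsDrop]
    simp only [decide_eq_decide]
    omega

theorem is_interleaved_alphanumeric_raises : Claim_raises_is_interleaved_alphanumeric := by
  unfold Claim_raises_is_interleaved_alphanumeric
  refine ⟨fun t _ h hn => hn h, by decide, rfl, ?_⟩
  simp [is_interleaved_alphanumeric_alt, pvRaiseWitness_is_interleaved_alphanumeric,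
    pvRaiseWitnessOut_is_interleaved_alphanumeric, pvRunCount_nil]

-- self-check: B's value at the raise witness, extracted from the raises theorem
theorem pvRaiseWitness_value_ok :
    is_interleaved_alphanumeric_alt pvRaiseWitness_is_interleaved_alphanumeric
      = pvRaiseWitnessOut_is_interleaved_alphanumeric := by
  have h := is_interleaved_alphanumeric_raises
  unfold Claim_raises_is_interleaved_alphanumeric at h
  exact h.2.2.2
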